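-- pv_equiv track=rewrite | github.com/martinctl/adaguleeer | src/assign_games.py | map_to_game
-- ===== SOURCE A (Python) =====
-- def map_to_game(title: str, tags: str, game_titles: list[str]) -> str:
--     """
--     Map the video to a game based on the title and tags.
--
--     Args:
--         title: str - title of the video
--         tags: str - list of tags of the video
--         game_titles: list[str] - list of game titles to search for
--
--     Returns:
--         str - name of the game if the video is related to a game, else None.
--     """
--     for game in game_titles:
--         if game in title:
--             return game
--
--     matched_games = []
--     for game in game_titles:
--         if game in tags:
--             matched_games.append(game)
--     if len(matched_games) == 1:
--         return matched_games[0]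
--     else:
--         return None
-- ===== SOURCE B (Python) =====
-- def map_to_game(title: str, tags: str, game_titles: list[str]) -> str:
--     """Single pass: return immediately on a title match; meanwhile keep a
--     count and the latest tag match, so no intermediate list and no second
--     scan are needed."""
--     tag_count = 0
--     tag_match = None
--     for game in game_titles:
--         if game in title:
--             return game
--         if game in tags:
--             tag_count += 1
--             tag_match = game
--     return tag_match if tag_count == 1 else None
-- ===== Notes on version B (the rewrite author's own statement) =====
-- stated objective: simpler
-- what changed: Replaces A's two full scans plus an intermediate matched-games list by a single pass that returns on the first title match and otherwise keeps only a counter and the last tag match.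
import Mathlib
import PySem

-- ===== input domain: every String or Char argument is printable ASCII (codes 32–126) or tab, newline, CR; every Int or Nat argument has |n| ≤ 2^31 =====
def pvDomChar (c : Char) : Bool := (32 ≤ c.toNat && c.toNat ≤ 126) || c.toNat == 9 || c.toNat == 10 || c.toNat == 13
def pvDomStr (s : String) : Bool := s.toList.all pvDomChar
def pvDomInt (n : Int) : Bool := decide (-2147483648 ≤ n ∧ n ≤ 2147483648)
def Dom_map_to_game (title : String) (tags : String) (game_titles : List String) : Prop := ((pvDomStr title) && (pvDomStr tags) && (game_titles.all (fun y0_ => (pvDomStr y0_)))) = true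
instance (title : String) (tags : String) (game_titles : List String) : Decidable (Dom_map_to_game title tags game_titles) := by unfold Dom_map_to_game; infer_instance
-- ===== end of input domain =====

-- B replaces A's two full scans and intermediate list by a single pass keeping a counter and the last tag match (same cost, simpler state).


-- ===== PORT A =====
-- first loop of A: return the first game that is a substring of title
def titleLoopA (title : String) : List String → Option String
  | [] => none
  | g :: rest => if PySem.Str.isIn g title then some g else titleLoopA title rest

def map_to_game (title : String) (tags : String) (game_titles : List String) : Option String :=
  match titleLoopA title game_titles with
  | some g => some g
  | none =>
    -- second loop of A: build matched_games by appending
    let matched_games := game_titles.foldl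
      (fun acc g => if PySem.Str.isIn g tags then acc ++ [g] else acc) []
    if matched_games.length = 1 then PySem.List.pyGet? matched_games 0 else none

-- ===== PORT B =====
-- B's single loop: early return on title match, else track (tag_count, tag_match)
def loopB (title : String) (tags : String) : List String → Nat → Option String → Option String
  | [], tag_count, tag_match => if tag_count = 1 then tag_match else none
  | g :: rest, tag_count, tag_match =>
    if PySem.Str.isIn g title then some g
    else if PySem.Str.isIn g tags then loopB title tags rest (tag_count + 1) (some g)
    else loopB title tags rest tag_count tag_match

def map_to_game_alt (title : String) (tags : String) (game_titles : List String) : Option String :=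
  loopB title tags game_titles 0 none

-- ===== PRECONDITION & SPEC =====
def Spec_map_to_game (title : String) (tags : String) (game_titles : List String) (out : Option String) : Prop := out = map_to_game_alt title tags game_titles
instance (title : String) (tags : String) (game_titles : List String) (out : Option String) : Decidable (Spec_map_to_game title tags game_titles out) := by unfold Spec_map_to_game; infer_instance

-- ===== CLAIM (what is proved, stated in full; the proofs are below) =====
def Claim_equal_map_to_game : Prop := ∀ (title : String) (tags : String) (game_titles : List String), Dom_map_to_game title tags game_titles → Spec_map_to_game title tags game_titles (map_to_game title tags game_titles)

-- ===== LEMMAS AND PROOFS =====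

-- B's accumulators (tag_count, tag_match) represent A's matched_games list m
-- as (m.length, m.getLast?); relate the single pass to A's two passes.
theorem loopB_eq (title tags : String) (gts : List String) (m : List String) :
    loopB title tags gts m.length m.getLast? =
      match titleLoopA title gts with
      | some g => some g
      | none =>
        let all := gts.foldl (fun acc g => if PySem.Str.isIn g tags then acc ++ [g] else acc) m
        if all.length = 1 then PySem.List.pyGet? all 0 else none := by
  induction gts generalizing m with
  | nil =>
    simp only [loopB, titleLoopA, List.foldl]
    rcases m with _ | ⟨x, _ | ⟨y, t⟩⟩ <;> simp [PySem.List.pyGet?, PySem.List.pyIdx?, List.getLast?]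
  | cons g rest ih =>
    simp only [loopB, titleLoopA, List.foldl]
    by_cases ht : PySem.Str.isIn g title = true
    · rw [if_pos ht, if_pos ht]
    · rw [if_neg ht, if_neg ht]
      by_cases hg : PySem.Str.isIn g tags = true
      · rw [if_pos hg, if_pos hg]
        have h1 : m.length + 1 = (m ++ [g]).length := by simp
        have h2 : (some g : Option String) = (m ++ [g]).getLast? := by simp
        rw [h1, h2, ih]
      · rw [if_neg hg, if_neg hg, ih]

theorem alt_eq (title tags : String) (gts : List String) :
    map_to_game_alt title tags gts = map_to_game title tags gts := by
  unfold map_to_game_alt map_to_game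
  have := loopB_eq title tags gts []
  simpa using this

-- ===== VERDICT (by name: the statement is the Claim_ definition above) =====
theorem map_to_game_spec : Claim_equal_map_to_game := by
  intro title tags gts _
  unfold Spec_map_to_game
  exact (alt_eq title tags gts).symm
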